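-- pv_equiv track=rewrite | github.com/JianJX/algorithms | algorithm/test.py | occurrence_in_sub_arr
-- ===== SOURCE A (Python) =====
-- def occurrence_in_sub_arr(a, queries):
--     result = 0
--     for q in queries:
--         left = q[0]
--         right = q[1]
--         x = q[2]
--         arr = a[left:right + 1]
--         for n in arr:
--             if n == x:
--                 result += 1
--     return result
-- ===== SOURCE B (Python) =====
-- def occurrence_in_sub_arr(a, queries):
--     # index each value's positions once, then count per query inside the
--     # normalized slice bounds instead of materializing the subarray
--     pos = {}
--     for i, v in enumerate(a):
--         pos.setdefault(v, []).append(i)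
--     n = len(a)
--     total = 0
--     for q in queries:
--         lo = q[0]
--         if lo < 0:
--             lo += n
--         lo = max(0, min(lo, n))
--         hi = q[1] + 1
--         if hi < 0:
--             hi += n
--         hi = max(0, min(hi, n))
--         ps = pos.get(q[2], [])
--         cnt = 0
--         for p in ps:
--             if lo <= p and p < hi:
--                 cnt += 1
--         total += cnt
--     return total
-- ===== Notes on version B (the rewrite author's own statement) =====
-- stated objective: alternative
-- what changed: B builds a value->positions index over the array once and answers each query by counting indexed positions inside the normalized slice bounds, instead of materializing and scanning the subarray per query; it trades per-query subarray scans for per-query scans of the queried value's position list.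
import Mathlib
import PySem

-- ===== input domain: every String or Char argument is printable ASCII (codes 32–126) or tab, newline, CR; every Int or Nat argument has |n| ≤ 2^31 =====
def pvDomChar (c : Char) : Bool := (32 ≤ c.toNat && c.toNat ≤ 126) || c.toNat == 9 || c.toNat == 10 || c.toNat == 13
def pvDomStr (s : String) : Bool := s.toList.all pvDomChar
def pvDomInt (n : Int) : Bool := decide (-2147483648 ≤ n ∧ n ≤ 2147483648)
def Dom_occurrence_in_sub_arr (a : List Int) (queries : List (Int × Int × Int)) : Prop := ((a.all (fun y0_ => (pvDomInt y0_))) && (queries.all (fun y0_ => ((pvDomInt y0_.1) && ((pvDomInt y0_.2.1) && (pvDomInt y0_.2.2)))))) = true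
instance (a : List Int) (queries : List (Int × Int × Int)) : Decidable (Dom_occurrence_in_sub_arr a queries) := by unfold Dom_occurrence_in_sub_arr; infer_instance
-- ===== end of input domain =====

-- B replaces A's per-query subarray scan by a value→positions index built once, counting per query inside normalized slice bounds (alternative algorithm, similar cost).

-- ===== PORT A =====
def occurrence_in_sub_arr (a : List Int) (queries : List (Int × Int × Int)) : Int :=
  queries.foldl (fun result q =>
    let left := q.1
    let right := q.2.1
    let x := q.2.2
    let arr := PySem.List.slice a (some left) (some (right + 1))
    arr.foldl (fun result n => if n == x then result + 1 else result) result) 0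

-- ===== PORT B =====
-- 'pos.setdefault(v, []).append(i)' over enumerate(a)
def pvPosIndex (a : List Int) : PySem.Dict Int (List Int) :=
  (PySem.List.enumerate a).foldl (fun d p => d.modify p.2 [] (fun ls => ls ++ [p.1])) PySem.Dict.empty

def occurrence_in_sub_arr_alt (a : List Int) (queries : List (Int × Int × Int)) : Int :=
  let pos := pvPosIndex a
  let n : Int := a.length
  queries.foldl (fun total q =>
    let lo0 := if q.1 < 0 then q.1 + n else q.1
    let lo := max 0 (min lo0 n)
    let hi0 := if q.2.1 + 1 < 0 then q.2.1 + 1 + n else q.2.1 + 1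
    let hi := max 0 (min hi0 n)
    let ps := pos.getD q.2.2 []
    total + ps.foldl (fun cnt p => if lo ≤ p ∧ p < hi then cnt + 1 else cnt) 0) 0

-- ===== PRECONDITION & SPEC =====
def Spec_occurrence_in_sub_arr (a : List Int) (queries : List (Int × Int × Int)) (out : Int) : Prop := out = occurrence_in_sub_arr_alt a queries
instance (a : List Int) (queries : List (Int × Int × Int)) (out : Int) : Decidable (Spec_occurrence_in_sub_arr a queries out) := by unfold Spec_occurrence_in_sub_arr; infer_instance

-- ===== CLAIM (what is proved, stated in full; the proofs are below) =====
def Claim_equal_occurrence_in_sub_arr : Prop := ∀ (a : List Int) (queries : List (Int × Int × Int)), Dom_occurrence_in_sub_arr a queries → Spec_occurrence_in_sub_arr a queries (occurrence_in_sub_arr a queries)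

-- ===== LEMMAS AND PROOFS =====

-- The grouping fold of B: looking up x yields the first components of the pairs whose second component is x.
theorem pvPosFold (l : List (Int × Int)) (d : PySem.Dict Int (List Int)) (x : Int) :
    (l.foldl (fun d p => d.modify p.2 [] (fun ls => ls ++ [p.1])) d).getD x []
      = d.getD x [] ++ (l.filter (fun p => p.2 == x)).map (·.1) := by
  induction l generalizing d with
  | nil => simp
  | cons p t ih =>
      simp only [List.foldl_cons, ih, List.filter_cons]
      by_cases h : p.2 = x
      · simp [h]
      · simp [h, PySem.Dict.getD_modify, Ne.symm h]

-- Counting indexed positions inside [L, H) equals counting x in the corresponding drop/take window.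
theorem pvKey (l : List Int) (s L H x : Int) :
    (PySem.List.enumerate l s).countP (fun p => decide (L ≤ p.1 ∧ p.1 < H) && (p.2 == x))
      = ((l.drop (min (L - s).toNat l.length)).take
          (min (H - s).toNat l.length - min (L - s).toNat l.length)).count x := by
  induction l generalizing s with
  | nil => simp
  | cons y t ih =>
      have hcons : PySem.List.enumerate (y :: t) s = (s, y) :: PySem.List.enumerate t (s + 1) := by
        simp [PySem.List.enumerate]
      rw [hcons, List.countP_cons, ih (s + 1)]
      have hL : (L - (s + 1)).toNat = (L - s).toNat - 1 := by omega
      have hH : (H - (s + 1)).toNat = (H - s).toNat - 1 := by omega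
      by_cases hLs : L - s ≤ 0
      · have hdL : min (L - s).toNat (t.length + 1) = 0 := by omega
        have hdL' : min (L - (s + 1)).toNat t.length = 0 := by omega
        by_cases hHs : H - s ≤ 0
        · have hdH : min (H - s).toNat (t.length + 1) = 0 := by omega
          have hdH' : min (H - (s + 1)).toNat t.length = 0 := by omega
          simp only [List.length_cons, hdL, hdL', hdH, hdH', List.drop_zero, Nat.zero_sub,
            List.take_zero, List.count_nil]
          have : ¬ (L ≤ s ∧ s < H) := by omega
          simp [this]
        · have e1 : min (L - s).toNat (y :: t).length = 0 := by simp; omega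
          have e3 : min (H - s).toNat (y :: t).length - min (L - s).toNat (y :: t).length
              = (min (H - (s + 1)).toNat t.length - min (L - (s + 1)).toNat t.length) + 1 := by
            simp; omega
          rw [e3, e1, hdL', List.drop_zero, List.drop_zero, List.take_succ_cons, List.count_cons]
          have h2 : (L ≤ s ∧ s < H) := by omega
          simp only [h2, and_self, decide_true, Bool.true_and]
      · have hdL : min (L - s).toNat (t.length + 1) = min (L - (s + 1)).toNat t.length + 1 := by
          omega
        have hdrop : (y :: t).drop (min (L - s).toNat (y :: t).length)
            = t.drop (min (L - (s + 1)).toNat t.length) := by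
          simp [hdL]
        have htake : min (H - s).toNat (y :: t).length - min (L - s).toNat (y :: t).length
            = min (H - (s + 1)).toNat t.length - min (L - (s + 1)).toNat t.length := by
          simp only [List.length_cons]; omega
        rw [hdrop, htake]
        have : ¬ (L ≤ s ∧ s < H) := by omega
        simp [this]

-- B's normalized bound equals Python's slice clamp.
theorem pvClamp (n : Nat) (i : Int) :
    min (max 0 (min (if i < 0 then i + n else i) (n : Int))).toNat n = PySem.List.clampIdx n i := by
  unfold PySem.List.clampIdx
  split_ifs <;> omega

-- Per-query agreement: A's slice count = B's indexed count.
theorem pvQuery (a : List Int) (left right x r : Int) :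
    (PySem.List.slice a (some left) (some (right + 1))).foldl
        (fun result n => if n == x then result + 1 else result) r
      = r + ((pvPosIndex a).getD x []).foldl
          (fun cnt p => if max 0 (min (if left < 0 then left + (a.length : Int) else left) (a.length : Int)) ≤ p
              ∧ p < max 0 (min (if right + 1 < 0 then right + 1 + (a.length : Int) else right + 1) (a.length : Int))
            then cnt + 1 else cnt) 0 := by
  set lo := max 0 (min (if left < 0 then left + (a.length : Int) else left) (a.length : Int)) with hlo
  set hi := max 0 (min (if right + 1 < 0 then right + 1 + (a.length : Int) else right + 1) (a.length : Int)) with hhi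
  rw [PySem.List.foldl_beq_add_one, PySem.List.foldl_ite_add_one]
  have hps : (pvPosIndex a).getD x []
      = ((PySem.List.enumerate a).filter (fun p => p.2 == x)).map (·.1) := by
    unfold pvPosIndex
    rw [pvPosFold]
    simp
  rw [hps, List.countP_map, List.countP_filter]
  simp only [Function.comp_apply, zero_add]
  have hk := pvKey a 0 lo hi x
  simp only [sub_zero] at hk
  rw [hk]
  have h1 : min lo.toNat a.length = PySem.List.clampIdx a.length left := by
    rw [hlo]; exact pvClamp a.length left
  have h2 : min hi.toNat a.length = PySem.List.clampIdx a.length (right + 1) := by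
    rw [hhi]; exact pvClamp a.length (right + 1)
  rw [h1, h2]
  rfl


-- ===== VERDICT (by name: the statement is the Claim_ definition above) =====
theorem occurrence_in_sub_arr_spec : Claim_equal_occurrence_in_sub_arr := by
  intro a queries _
  unfold Spec_occurrence_in_sub_arr occurrence_in_sub_arr occurrence_in_sub_arr_alt
  simp only []
  apply PySem.List.foldl_congr_mem
  intro acc q _
  exact pvQuery a q.1 q.2.1 q.2.2 acc
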